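-- pv_equiv track=rewrite | github.com/isudox/nerd-algo | python-algo/leetcode/problem_2511.py | captureForts
-- ===== SOURCE A (Python) =====
-- from typing import List
--
-- def captureForts(forts: List[int]) -> int:
--     ans = 0
--     pre_pos = pre_num = -9
--     for i, num in enumerate(forts):
--         if num == 0:
--             continue
--         if pre_num * num == -1:
--             ans = max(ans, i - pre_pos - 1)
--         pre_pos, pre_num = i, num
--     return ans
-- ===== SOURCE B (Python) =====
-- from typing import List
--
-- def captureForts(forts: List[int]) -> int:
--     # Run-length encode the forts, then a zero-run counts iff its two
--     # neighbouring runs are opposite forts; answer = longest such zero run.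
--     runs = []
--     for v in forts:
--         if runs and runs[-1][0] == v:
--             runs[-1] = (v, runs[-1][1] + 1)
--         else:
--             runs.append((v, 1))
--     ans = 0
--     for (a, _), (z, c), (b, _) in zip(runs, runs[1:], runs[2:]):
--         if z == 0 and a * b == -1:
--             ans = max(ans, c)
--     return ans
-- ===== Notes on version B (the rewrite author's own statement) =====
-- stated objective: alternative
-- what changed: Replaces A's single stateful scan carrying (pre_pos, pre_num) sentinels with a run-length-encoding approach: compress the list into (value, run-length) runs, then take the longest zero-valued run whose two neighbouring runs are opposite forts.
import Mathlib
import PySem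

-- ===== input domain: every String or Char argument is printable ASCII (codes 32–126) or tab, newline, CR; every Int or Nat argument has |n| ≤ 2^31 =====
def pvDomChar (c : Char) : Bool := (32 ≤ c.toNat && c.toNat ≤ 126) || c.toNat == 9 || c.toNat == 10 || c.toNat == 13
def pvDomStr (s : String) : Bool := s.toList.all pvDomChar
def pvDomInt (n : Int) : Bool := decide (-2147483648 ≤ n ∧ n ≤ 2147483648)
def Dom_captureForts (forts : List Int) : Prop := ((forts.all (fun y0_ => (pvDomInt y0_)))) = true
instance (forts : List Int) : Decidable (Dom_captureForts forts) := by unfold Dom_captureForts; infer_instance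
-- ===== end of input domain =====

-- B replaces A's single stateful scan (sentinel pre_pos/pre_num state) with a
-- run-length-encoding approach: compress into (value, count) runs, then take the
-- longest zero run flanked by opposite forts (objective: alternative).

-- ===== PORT A =====
-- one stateful pass: state (ans, pre_pos, pre_num), initialised (0, -9, -9)
def captureForts (forts : List Int) : Int :=
  (((PySem.List.enumerate forts).foldl
    (fun (st : Int × Int × Int) (p : Int × Int) =>
      if p.2 = 0 then st
      else if st.2.2 * p.2 = -1 then (max st.1 (p.1 - st.2.1 - 1), p.1, p.2)
      else (st.1, p.1, p.2))
    (0, -9, -9))).1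

-- ===== PORT B =====
-- pass 1: run-length encode (append a new run, or bump the count of runs[-1])
def pvRleStep (runs : List (Int × Int)) (v : Int) : List (Int × Int) :=
  match runs.getLast? with
  | some (w, c) => if w = v then runs.dropLast ++ [(v, c + 1)] else runs ++ [(v, 1)]
  | none => [(v, 1)]

-- pass 2: zip(runs, runs[1:], runs[2:]); a zero run flanked by opposite forts counts
def captureForts_alt (forts : List Int) : Int :=
  let runs := forts.foldl pvRleStep []
  (runs.zip (runs.tail.zip runs.tail.tail)).foldl
    (fun ans t => if t.2.1.1 = 0 ∧ t.1.1 * t.2.2.1 = -1 then max ans t.2.1.2 else ans) 0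

-- ===== PRECONDITION & SPEC =====
def Spec_captureForts (forts : List Int) (out : Int) : Prop := out = captureForts_alt forts
instance (forts : List Int) (out : Int) : Decidable (Spec_captureForts forts out) := by unfold Spec_captureForts; infer_instance

-- ===== CLAIM (what is proved, stated in full; the proofs are below) =====
def Claim_equal_captureForts : Prop := ∀ (forts : List Int), Dom_captureForts forts → Spec_captureForts forts (captureForts forts)

-- ===== LEMMAS AND PROOFS =====

-- A's loop body, named for the lemmas
def pvStepA (st : Int × Int × Int) (p : Int × Int) : Int × Int × Int :=
  if p.2 = 0 then st
  else if st.2.2 * p.2 = -1 then (max st.1 (p.1 - st.2.1 - 1), p.1, p.2)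
  else (st.1, p.1, p.2)

-- B's second-pass body, named
def pvStep3 (ans : Int) (t : (Int × Int) × (Int × Int) × (Int × Int)) : Int :=
  if t.2.1.1 = 0 ∧ t.1.1 * t.2.2.1 = -1 then max ans t.2.1.2 else ans

-- the list of consecutive triples, recursively
def pvTriples : List (Int × Int) → List ((Int × Int) × (Int × Int) × (Int × Int))
  | a :: b :: c :: t => (a, b, c) :: pvTriples (b :: c :: t)
  | _ => []

-- B's second pass, as a function of the run list
def pvG (R : List (Int × Int)) : Int := (pvTriples R).foldl pvStep3 0

theorem pvZipTriples (l : List (Int × Int)) :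
    l.zip (l.tail.zip l.tail.tail) = pvTriples l := by
  induction l with
  | nil => simp [pvTriples]
  | cons a t ih =>
    match t with
    | [] => simp [pvTriples]
    | [b] => simp [pvTriples]
    | b :: c :: t' => simpa [pvTriples] using ih

theorem pvTriples_snoc (S : List (Int × Int)) (p q x : Int × Int) :
    pvTriples (S ++ [p, q, x]) = pvTriples (S ++ [p, q]) ++ [(p, q, x)] := by
  induction S with
  | nil => simp [pvTriples]
  | cons a S' ih =>
    match S' with
    | [] => simp [pvTriples]
    | [b] => simp [pvTriples]
    | b :: c :: S'' => simpa [pvTriples] using ih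

theorem pvG_snoc (S : List (Int × Int)) (p q x : Int × Int) :
    pvG (S ++ [p, q, x]) = pvStep3 (pvG (S ++ [p, q])) (p, q, x) := by
  simp [pvG, pvTriples_snoc]

theorem pvG_small (l : List (Int × Int)) (h : l.length ≤ 2) : pvG l = 0 := by
  match l with
  | [] => simp [pvG, pvTriples]
  | [a] => simp [pvG, pvTriples]
  | [a, b] => simp [pvG, pvTriples]
  | a :: b :: c :: t => simp at h

-- appending anything after a nonzero-valued last run does not change pvG
theorem pvG_snoc_nonzero (R : List (Int × Int)) (a c : Int) (x : Int × Int)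
    (ha : a ≠ 0) : pvG (R ++ [(a, c), x]) = pvG (R ++ [(a, c)]) := by
  rcases List.eq_nil_or_concat R with h | ⟨S, q, h⟩
  · subst h
    rw [pvG_small _ (by simp), pvG_small _ (by simp)]
  · subst h
    have h1 : S.concat q ++ [(a, c), x] = S ++ [q, (a, c), x] := by simp
    have h2 : S.concat q ++ [(a, c)] = S ++ [q, (a, c)] := by simp
    rw [h1, h2, pvG_snoc]
    simp [pvStep3, ha]

-- pvG does not depend on the count of the last run
theorem pvG_last_count (R : List (Int × Int)) (w c c' : Int) :
    pvG (R ++ [(w, c)]) = pvG (R ++ [(w, c')]) := by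
  rcases List.eq_nil_or_concat R with h | ⟨S, q, h⟩
  · subst h; rw [pvG_small _ (by simp), pvG_small _ (by simp)]
  · subst h
    rcases List.eq_nil_or_concat S with h' | ⟨S', p, h'⟩
    · subst h'; rw [pvG_small _ (by simp), pvG_small _ (by simp)]
    · subst h'
      have h1 : (S'.concat p).concat q ++ [(w, c)] = S' ++ [p, q, (w, c)] := by simp
      have h2 : (S'.concat p).concat q ++ [(w, c')] = S' ++ [p, q, (w, c')] := by simp
      rw [h1, h2, pvG_snoc, pvG_snoc]
      simp [pvStep3]

theorem pvRleStep_concat (R : List (Int × Int)) (w c v : Int) :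
    pvRleStep (R ++ [(w, c)]) v =
      if w = v then R ++ [(w, c + 1)] else R ++ [(w, c), (v, 1)] := by
  simp only [pvRleStep, List.getLast?_concat, List.dropLast_concat]
  split_ifs with h
  · subst h; rfl
  · simp

theorem pvNoSq (a : Int) (h : a * a = -1) : False := by nlinarith [mul_self_nonneg a]

-- the simulation invariant: A's fold state vs the run-length encoding
theorem pvInv (l : List Int) :
    (l.foldl pvRleStep [] = [] ∧
      (PySem.List.enumerate l).foldl pvStepA (0, -9, -9) = (0, -9, -9)) ∨
    (∃ k, l.foldl pvRleStep [] = [(0, k)] ∧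
      (PySem.List.enumerate l).foldl pvStepA (0, -9, -9) = (0, -9, -9)) ∨
    (∃ R a c, a ≠ 0 ∧ l.foldl pvRleStep [] = R ++ [(a, c)] ∧
      (PySem.List.enumerate l).foldl pvStepA (0, -9, -9)
        = (pvG (l.foldl pvRleStep []), (l.length : Int) - 1, a) ∧
      0 ≤ pvG (l.foldl pvRleStep [])) ∨
    (∃ R a c k, a ≠ 0 ∧ l.foldl pvRleStep [] = R ++ [(a, c), (0, k)] ∧
      (PySem.List.enumerate l).foldl pvStepA (0, -9, -9)
        = (pvG (l.foldl pvRleStep []), (l.length : Int) - 1 - k, a) ∧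
      0 ≤ pvG (l.foldl pvRleStep [])) := by
  induction l using List.reverseRecOn with
  | nil =>
    left
    constructor
    · rfl
    · simp [PySem.List.enumerate]
  | append_singleton l v ih =>
    have hRle : (l ++ [v]).foldl pvRleStep [] = pvRleStep (l.foldl pvRleStep []) v := by
      simp [List.foldl_append]
    have hA : (PySem.List.enumerate (l ++ [v])).foldl pvStepA (0, -9, -9)
        = pvStepA ((PySem.List.enumerate l).foldl pvStepA (0, -9, -9)) ((l.length : Int), v) := by
      rw [PySem.List.enumerate_append]
      simp [PySem.List.enumerate_cons, PySem.List.enumerate_nil, List.foldl_append]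
    have hlen : ((l ++ [v]).length : Int) = (l.length : Int) + 1 := by simp
    rcases ih with ⟨hR, hS⟩ | ⟨k, hR, hS⟩ | ⟨R, a, c, ha, hR, hS, hg⟩ | ⟨R, a, c, k, ha, hR, hS, hg⟩
    · -- P0: empty so far
      by_cases hv : v = 0
      · right; left
        refine ⟨1, ?_, ?_⟩
        · rw [hRle, hR, hv]; rfl
        · rw [hA, hS, hv]; simp [pvStepA]
      · right; right; left
        refine ⟨[], v, 1, hv, ?_, ?_, ?_⟩
        · rw [hRle, hR]; rfl
        · rw [hA, hS, hRle, hR]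
          have h9 : ¬ ((-9 : Int) * v = -1) := by omega
          simp only [pvStepA]
          rw [if_neg hv, if_neg h9, pvG_small _ (by simp [pvRleStep]), hlen]
          simp
        · rw [hRle, hR, pvG_small _ (by simp [pvRleStep])]
    · -- P1: all zeros so far
      by_cases hv : v = 0
      · right; left
        refine ⟨k + 1, ?_, ?_⟩
        · rw [hRle, hR, hv]
          have := pvRleStep_concat [] 0 k 0
          simpa using this
        · rw [hA, hS, hv]; simp [pvStepA]
      · right; right; left
        have hstep : pvRleStep [(0, k)] v = [(0, k), (v, 1)] := by
          have := pvRleStep_concat [] 0 k v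
          simp only [List.nil_append] at this
          rw [this, if_neg (by omega)]
        refine ⟨[(0, k)], v, 1, hv, ?_, ?_, ?_⟩
        · rw [hRle, hR, hstep]; rfl
        · rw [hA, hS, hRle, hR, hstep]
          have h9 : ¬ ((-9 : Int) * v = -1) := by omega
          simp only [pvStepA]
          rw [if_neg hv, if_neg h9, pvG_small _ (by simp), hlen]
          simp
        · rw [hRle, hR, hstep, pvG_small _ (by simp)]
    · -- P2: ends with a nonzero run (a, c)
      have hstep := pvRleStep_concat R a c v
      by_cases hv : v = 0
      · -- append a fresh zero run
        have hav : ¬ (a = v) := by rw [hv]; exact ha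
        have hnew : (l ++ [v]).foldl pvRleStep [] = R ++ [(a, c), (0, 1)] := by
          rw [hRle, hR, hstep, if_neg hav, hv]
        have hGeq : pvG (R ++ [(a, c), (0, 1)]) = pvG (R ++ [(a, c)]) :=
          pvG_snoc_nonzero R a c (0, 1) ha
        right; right; right
        refine ⟨R, a, c, 1, ha, hnew, ?_, ?_⟩
        · rw [hA, hS, hnew, hGeq, ← hR]
          simp [pvStepA, hv]
        · rw [hnew, hGeq, ← hR]; exact hg
      · by_cases hav : a = v
        · -- extend the nonzero run
          have hnew : (l ++ [v]).foldl pvRleStep [] = R ++ [(a, c + 1)] := by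
            rw [hRle, hR, hstep, if_pos hav, hav]
          have hGeq : pvG (R ++ [(a, c + 1)]) = pvG (R ++ [(a, c)]) :=
            pvG_last_count R a (c + 1) c
          right; right; left
          refine ⟨R, a, c + 1, ha, hnew, ?_, ?_⟩
          · rw [hA, hS, hnew, hGeq, ← hR]
            have hsq : ¬ (a * v = -1) := by
              rw [← hav]; intro h; exact pvNoSq a h
            simp only [pvStepA]
            rw [if_neg hv, if_neg hsq, hav]
            simp
          · rw [hnew, hGeq, ← hR]; exact hg
        · -- append a fresh nonzero run
          have hnew : (l ++ [v]).foldl pvRleStep [] = (R ++ [(a, c)]) ++ [(v, 1)] := by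
            rw [hRle, hR, hstep, if_neg hav]; simp
          have hGeq : pvG ((R ++ [(a, c)]) ++ [(v, 1)]) = pvG (R ++ [(a, c)]) := by
            have := pvG_snoc_nonzero R a c (v, 1) ha
            simpa using this
          right; right; left
          refine ⟨R ++ [(a, c)], v, 1, hv, hnew, ?_, ?_⟩
          · have hg' : 0 ≤ pvG (R ++ [(a, c)]) := by rw [← hR]; exact hg
            rw [hA, hS, hnew, hGeq, ← hR]
            simp only [pvStepA]
            rw [if_neg hv]
            by_cases hop : a * v = -1
            · rw [if_pos hop]
              have h0 : (l.length : Int) - ((l.length : Int) - 1) - 1 = 0 := by ring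
              rw [h0, hR, max_eq_left hg']
              simp
            · rw [if_neg hop]
              simp
          · rw [hnew, hGeq, ← hR]; exact hg
    · -- P3: ends with nonzero run (a, c) then zero run (0, k)
      have hstep : pvRleStep (R ++ [(a, c), (0, k)]) v =
          if (0 : Int) = v then R ++ [(a, c)] ++ [(0, k + 1)]
          else R ++ [(a, c)] ++ [(0, k), (v, 1)] := by
        have := pvRleStep_concat (R ++ [(a, c)]) 0 k v
        simpa using this
      by_cases hv : v = 0
      · -- extend the trailing zero run
        have hnew : (l ++ [v]).foldl pvRleStep [] = R ++ [(a, c), (0, k + 1)] := by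
          rw [hRle, hR, hstep, if_pos (by omega)]; simp
        have hGeq : pvG (R ++ [(a, c), (0, k + 1)]) = pvG (R ++ [(a, c), (0, k)]) := by
          rw [pvG_snoc_nonzero R a c (0, k + 1) ha, pvG_snoc_nonzero R a c (0, k) ha]
        right; right; right
        refine ⟨R, a, c, k + 1, ha, hnew, ?_, ?_⟩
        · rw [hA, hS, hnew, hGeq, ← hR]
          simp [pvStepA, hv]
          omega
        · rw [hnew, hGeq, ← hR]; exact hg
      · -- close the zero run with a nonzero fort
        have hnew : (l ++ [v]).foldl pvRleStep [] = R ++ [(a, c), (0, k), (v, 1)] := by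
          rw [hRle, hR, hstep, if_neg (by omega)]; simp
        have hGval : pvG (R ++ [(a, c), (0, k), (v, 1)]) =
            if a * v = -1 then max (pvG (R ++ [(a, c), (0, k)])) k
            else pvG (R ++ [(a, c), (0, k)]) := by
          rw [pvG_snoc R (a, c) (0, k) (v, 1)]
          simp [pvStep3]
        right; right; left
        refine ⟨R ++ [(a, c), (0, k)], v, 1, hv, by rw [hnew]; simp, ?_, ?_⟩
        · rw [hA, hS, hnew, hGval, ← hR]
          simp only [pvStepA]
          rw [if_neg hv]
          by_cases hop : a * v = -1
          · rw [if_pos hop, if_pos hop]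
            have h0 : (l.length : Int) - ((l.length : Int) - 1 - k) - 1 = k := by ring
            rw [h0]
            simp
          · rw [if_neg hop, if_neg hop]
            simp
        · rw [hnew, hGval, ← hR]
          by_cases hop : a * v = -1
          · rw [if_pos hop]; exact le_trans hg (le_max_left _ _)
          · rw [if_neg hop]; exact hg

-- ===== VERDICT (by name: the statement is the Claim_ definition above) =====
theorem captureForts_spec : Claim_equal_captureForts := by
  intro forts _
  unfold Spec_captureForts
  have hB : captureForts_alt forts = pvG (forts.foldl pvRleStep []) := by
    simp only [captureForts_alt, pvZipTriples]; rfl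
  have hA : captureForts forts
      = ((PySem.List.enumerate forts).foldl pvStepA (0, -9, -9)).1 := rfl
  rw [hA, hB]
  rcases pvInv forts with ⟨hR, hS⟩ | ⟨k, hR, hS⟩ | ⟨R, a, c, ha, hR, hS, _⟩
      | ⟨R, a, c, k, ha, hR, hS, _⟩
  · rw [hS, hR, pvG_small _ (by simp)]
  · rw [hS, hR, pvG_small _ (by simp)]
  · rw [hS]
  · rw [hS]
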